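-- pv_equiv track=rewrite | github.com/fotilgive/hacxgpt | server.py | strip_junk
-- ===== SOURCE A (Python) =====
-- _JUNK_STRINGS = [
--     "IMPORTANT NOTICE", "legacy text API", "enter.pollinations.ai",
--     "deprecation_notice", "Queue full for IP", "Model not found",
-- ]
--
-- def is_junk(text: str) -> bool:
--     return any(j in text for j in _JUNK_STRINGS)
--
-- def strip_junk(text: str) -> str:
--     lines   = text.split('\n')
--     clean   = []
--     skip    = False
--     for line in lines:
--         if is_junk(line):
--             skip = True
--             continue
--         if skip and not line.strip():
--             skip = False
--             continue
--         if not skip: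
--             clean.append(line)
--     return '\n'.join(clean).strip()
-- ===== SOURCE B (Python) =====
-- _JUNK_STRINGS = [
--     "IMPORTANT NOTICE", "legacy text API", "enter.pollinations.ai",
--     "deprecation_notice", "Queue full for IP", "Model not found",
-- ]
--
-- def is_junk(text: str) -> bool:
--     return any(j in text for j in _JUNK_STRINGS)
--
-- def strip_junk(text: str) -> str:
--     lines = text.split('\n')
--     clean = []
--     i = 0
--     n = len(lines)
--     while i < n:
--         line = lines[i]
--         if is_junk(line):
--             # drop the junk line, then the whole run of following non-blank
--             # lines, then the blank line that terminates the run (if any)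
--             i += 1
--             while i < n and lines[i].strip():
--                 i += 1
--             if i < n:
--                 i += 1
--         else:
--             clean.append(line)
--             i += 1
--     return '\n'.join(clean).strip()
-- ===== Notes on version B (the rewrite author's own statement) =====
-- stated objective: alternative
-- what changed: Replaces the cross-iteration skip-flag state machine with an index-based while loop that, on a junk line, consumes the whole following non-blank run and its terminating blank in a nested inner loop.
import Mathlib
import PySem

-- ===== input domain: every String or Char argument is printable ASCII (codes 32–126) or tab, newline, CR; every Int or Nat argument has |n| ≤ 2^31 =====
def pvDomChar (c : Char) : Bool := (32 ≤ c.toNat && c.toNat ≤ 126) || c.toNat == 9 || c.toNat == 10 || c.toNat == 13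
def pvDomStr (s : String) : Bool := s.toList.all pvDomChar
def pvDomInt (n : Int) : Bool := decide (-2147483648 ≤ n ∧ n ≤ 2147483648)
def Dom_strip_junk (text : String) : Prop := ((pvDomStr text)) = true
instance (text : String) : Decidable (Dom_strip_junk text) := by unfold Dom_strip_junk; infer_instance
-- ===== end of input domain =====

-- B replaces A's skip-flag state machine by an index/run-consuming nested loop; alternative decomposition, same cost.

-- ===== PORT A =====
def junkStrings : List String :=
  ["IMPORTANT NOTICE", "legacy text API", "enter.pollinations.ai",
   "deprecation_notice", "Queue full for IP", "Model not found"]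

def is_junk (text : String) : Bool :=
  junkStrings.any (fun j => PySem.Str.isIn j text)

def strip_junk (text : String) : String :=
  let lines := (PySem.Str.split? text "\n").getD []   -- sep "\n" ≠ "", so split? is always some
  let res := lines.foldl
    (fun (acc : List String × Bool) line =>
      if is_junk line then (acc.1, true)
      else if acc.2 && (PySem.Str.strip line == "") then (acc.1, false)
      else if !acc.2 then (acc.1 ++ [line], acc.2)
      else acc)
    ([], false)
  PySem.Str.strip (PySem.Str.join "\n" res.1)

-- ===== PORT B =====
-- B's inner 'while i < n and lines[i].strip(): i += 1' followed by 'if i < n: i += 1':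
-- drop the non-blank run after a junk line and the blank that terminates it.
def consumeRun : List String → List String
  | [] => []
  | l :: ls => if PySem.Str.strip l == "" then ls else consumeRun ls

theorem consumeRun_length_le (ls : List String) : (consumeRun ls).length ≤ ls.length := by
  induction ls with
  | nil => simp [consumeRun]
  | cons l ls ih =>
    simp only [consumeRun]
    split
    · simp
    · exact Nat.le_trans ih (Nat.le_succ _)

-- B's outer while loop over the line index
def altGo : List String → List String
  | [] => []
  | l :: ls =>
    if is_junk l then altGo (consumeRun ls)
    else l :: altGo ls
termination_by ls => ls.length
decreasing_by
  · exact Nat.lt_succ_of_le (consumeRun_length_le ls)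
  · exact Nat.lt_succ_of_le (Nat.le_refl _)

def strip_junk_alt (text : String) : String :=
  let lines := (PySem.Str.split? text "\n").getD []
  PySem.Str.strip (PySem.Str.join "\n" (altGo lines))

-- ===== PRECONDITION & SPEC =====
def Spec_strip_junk (text : String) (out : String) : Prop := out = strip_junk_alt text
instance (text : String) (out : String) : Decidable (Spec_strip_junk text out) := by unfold Spec_strip_junk; infer_instance

-- ===== CLAIM (what is proved, stated in full; the proofs are below) =====
def Claim_equal_strip_junk : Prop := ∀ (text : String), Dom_strip_junk text → Spec_strip_junk text (strip_junk text)

-- ===== LEMMAS AND PROOFS =====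

-- A's loop body, named for the proofs
def stepA (acc : List String × Bool) (line : String) : List String × Bool :=
  if is_junk line then (acc.1, true)
  else if acc.2 && (PySem.Str.strip line == "") then (acc.1, false)
  else if !acc.2 then (acc.1 ++ [line], acc.2)
  else acc

-- functional reading of A's loop, carrying only the lines still to come and the skip flag
def funA : List String → Bool → List String
  | [], _ => []
  | l :: ls, skip =>
    if is_junk l then funA ls true
    else if skip && (PySem.Str.strip l == "") then funA ls false
    else if !skip then l :: funA ls skip
    else funA ls skip

theorem foldA_fst (ls : List String) (acc : List String) (skip : Bool) :
    (ls.foldl stepA (acc, skip)).1 = acc ++ funA ls skip := by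
  induction ls generalizing acc skip with
  | nil => simp [funA]
  | cons l ls ih =>
    rw [List.foldl_cons]
    by_cases hj : is_junk l
    · have h1 : stepA (acc, skip) l = (acc, true) := by simp [stepA, hj]
      have h2 : funA (l :: ls) skip = funA ls true := by simp [funA, hj]
      rw [h1, h2, ih]
    · by_cases hs : (skip && (PySem.Str.strip l == "")) = true
      · have h1 : stepA (acc, skip) l = (acc, false) := by simp [stepA, hj, hs]
        have h2 : funA (l :: ls) skip = funA ls false := by simp [funA, hj, hs]
        rw [h1, h2, ih]
      · by_cases hk : skip
        · have hb : ¬ PySem.Str.strip l = "" := by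
            subst hk; simpa using hs
          have h1 : stepA (acc, skip) l = (acc, skip) := by
            simp [stepA, hj, hk, hb]
          have h2 : funA (l :: ls) skip = funA ls skip := by
            simp [funA, hj, hk, hb]
          rw [h1, h2, ih]
        · simp only [Bool.not_eq_true] at hk
          subst hk
          have h1 : stepA (acc, false) l = (acc ++ [l], false) := by
            simp [stepA, hj]
          have h2 : funA (l :: ls) false = l :: funA ls false := by
            simp [funA, hj]
          rw [h1, h2, ih, List.append_assoc]
          rfl

-- a line that strips to empty consists of whitespace only, hence contains no junk string
theorem blank_not_junk (l : String) (h : (PySem.Str.strip l == "") = true) :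
    is_junk l = false := by
  have hnil : PySem.Chars.strip l.toList = [] := by
    have h' : PySem.Str.strip l = "" := by simpa using h
    have := congrArg String.toList h'
    simpa [PySem.Str.strip] using this
  -- every char of l is whitespace
  have hws : ∀ c ∈ l.toList, PySem.Chars.isspace c = true := by
    intro c hc
    have hdropnil : List.dropWhile PySem.Chars.isspace
        (List.dropWhile PySem.Chars.isspace l.toList).reverse = [] := by
      have := hnil
      simp only [PySem.Chars.strip, PySem.Chars.rstrip, PySem.Chars.lstrip,
        List.reverse_eq_nil_iff] at this
      exact this
    have hdrop : ∀ c ∈ List.dropWhile PySem.Chars.isspace l.toList,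
        PySem.Chars.isspace c = true := by
      intro c hc
      exact (List.dropWhile_eq_nil_iff).1 hdropnil c (by simpa using hc)
    have hsplit := List.takeWhile_append_dropWhile (p := PySem.Chars.isspace) (l := l.toList)
    rw [← hsplit] at hc
    rcases List.mem_append.1 hc with h1 | h2
    · exact List.mem_takeWhile_imp h1
    · exact hdrop c h2
  -- yet every junk string contains a non-whitespace character
  by_contra hjunk
  have hj : is_junk l = true := by
    cases hb : is_junk l
    · exact absurd hb hjunk
    · rfl
  simp only [is_junk, List.any_eq_true] at hj
  obtain ⟨j, hjmem, hin⟩ := hj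
  have hinf : j.toList <:+: l.toList := (PySem.Str.isIn_iff_infix j l).1 hin
  have hex : ∃ c ∈ j.toList, PySem.Chars.isspace c = false := by
    fin_cases hjmem
    · exact ⟨'I', by decide, by decide⟩
    · exact ⟨'l', by decide, by decide⟩
    · exact ⟨'e', by decide, by decide⟩
    · exact ⟨'d', by decide, by decide⟩
    · exact ⟨'Q', by decide, by decide⟩
    · exact ⟨'M', by decide, by decide⟩
  obtain ⟨c, hcj, hcs⟩ := hex
  have := hws c (hinf.subset hcj)
  rw [this] at hcs
  cases hcs

theorem junk_not_blank (l : String) (h : is_junk l = true) :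
    (PySem.Str.strip l == "") = false := by
  cases hb : (PySem.Str.strip l == "")
  · rfl
  · rw [blank_not_junk l hb] at h; cases h

theorem funA_eq_altGo (ls : List String) :
    funA ls false = altGo ls ∧ funA ls true = altGo (consumeRun ls) := by
  induction ls with
  | nil => simp [funA, altGo, consumeRun]
  | cons l ls ih =>
    constructor
    · by_cases hj : is_junk l
      · simp [funA, altGo, hj, ih.2]
      · simp [funA, altGo, hj, ih.1]
    · by_cases hj : is_junk l
      · have hb := junk_not_blank l hj
        simp [funA, consumeRun, hj, hb, ih.2]
      · by_cases hb : (PySem.Str.strip l == "") = true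
        · simp [funA, consumeRun, hj, hb, ih.1]
        · simp only [Bool.not_eq_true] at hb
          simp [funA, consumeRun, hj, hb, ih.2]

-- ===== VERDICT (by name: the statement is the Claim_ definition above) =====
theorem strip_junk_spec : Claim_equal_strip_junk := by
  intro text _
  show PySem.Str.strip (PySem.Str.join "\n"
      (((PySem.Str.split? text "\n").getD []).foldl stepA ([], false)).1) = strip_junk_alt text
  rw [foldA_fst, (funA_eq_altGo _).1]
  simp [strip_junk_alt]
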